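-- pv_equiv track=rewrite | github.com/ChanMeng666/juejin-algorithm-practice | problems/068-journey-water-supply/solution.py | solution
-- ===== SOURCE A (Python) =====
-- def solution(d, w, position, supply):
--     # If the initial water is enough to reach the destination, return 0 directly
--     if w >= d:
--         return 0
--
--     # If there are no supply stations and the initial water is insufficient, return -1
--     if not position:
--         return -1
--
--     # Sort supply stations by position
--     stations = list(zip(position, supply))
--     stations.sort()
--
--     # Current water and position
--     current_water = w
--     current_pos = 0
--     refill_count = 0
--
--     while current_pos < d:
--         max_reach = current_pos + current_water
--
--         # If the current water can reach the destination directly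
--         if max_reach >= d:
--             return refill_count
--
--         # Find the station with the maximum supply within the reachable range
--         best_station_index = -1
--         max_supply = -1
--
--         for i, (station_pos, station_supply) in enumerate(stations):
--             # Skip stations already passed
--             if station_pos <= current_pos:
--                 continue
--             # If the station is beyond the reachable range
--             if station_pos > max_reach:
--                 break
--             # Select the station with the maximum supply
--             if station_supply > max_supply:
--                 max_supply = station_supply
--                 best_station_index = i
--
--         # If no reachable supply station is found
--         if best_station_index == -1:
--             return -1
--
--         # Move to the selected supply station
--         station_pos, station_supply = stations[best_station_index]
--         # Update remaining water (subtract the amount consumed en route)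
--         current_water -= (station_pos - current_pos)
--         # Refill water at the supply station
--         current_water = station_supply
--         current_pos = station_pos
--         refill_count += 1
--
--         # Remove visited stations
--         stations = stations[best_station_index + 1:]
--
--     return refill_count
-- ===== SOURCE B (Python) =====
-- def solution(d, w, position, supply):
--     # Already enough water, or no stations to refill at.
--     if w >= d:
--         return 0
--     if not position:
--         return -1
--
--     # Sort stations once by (descending supply, ascending position): the first
--     # station of this list lying inside the reachable window IS the greedy
--     # choice (maximum supply, nearest on ties) -- no per-step best-tracking scan.
--     by_supply = sorted(zip(position, supply), key=lambda t: (-t[1], t[0]))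
--
--     pos = 0
--     water = w
--     refills = 0
--     while pos < d:
--         if pos + water >= d:
--             return refills
--         chosen = None
--         for i, (q, s) in enumerate(by_supply):
--             if pos < q <= pos + water:
--                 chosen = i
--                 break
--         if chosen is None:
--             return -1
--         pos, water = by_supply.pop(chosen)
--         refills += 1
--     return refills
-- ===== Notes on version B (the rewrite author's own statement) =====
-- stated objective: alternative
-- what changed: B replaces A's per-step enumerate scan over the position-sorted list (tracking best index and max supply, then slicing the list past the chosen station) by a single sort in (descending supply, ascending position) order, in which the greedy choice is simply the first station lying in the reachable window, removed with pop().
import Mathlib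
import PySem

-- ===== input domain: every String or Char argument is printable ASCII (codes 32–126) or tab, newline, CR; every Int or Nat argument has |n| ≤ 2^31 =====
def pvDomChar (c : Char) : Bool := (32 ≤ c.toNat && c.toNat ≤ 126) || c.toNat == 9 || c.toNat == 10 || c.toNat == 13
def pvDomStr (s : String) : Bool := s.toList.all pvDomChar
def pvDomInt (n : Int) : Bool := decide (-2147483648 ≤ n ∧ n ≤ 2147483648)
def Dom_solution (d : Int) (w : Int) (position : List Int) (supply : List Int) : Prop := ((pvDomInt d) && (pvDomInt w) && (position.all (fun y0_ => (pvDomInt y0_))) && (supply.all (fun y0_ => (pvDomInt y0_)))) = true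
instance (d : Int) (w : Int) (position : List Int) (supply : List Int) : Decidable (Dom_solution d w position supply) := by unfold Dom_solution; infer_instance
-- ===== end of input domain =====

-- B replaces A's per-step best-station scan (with index bookkeeping and list slicing) by one
-- sort in descending-supply order and a first-hit window test; same return value, alternative algorithm.

-- ===== PORT A =====

-- inner 'for i, (station_pos, station_supply) in enumerate(stations)' scan of A:
-- skip (continue) stations with pos ≤ current_pos, break past max_reach, keep the first strict max supply
def scanA (p r : Int) : List (Int × Int) → Int → Int → Int → Int × Int
  | [], _, best, msup => (best, msup)
  | t :: rest, i, best, msup =>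
    if t.1 ≤ p then scanA p r rest (i + 1) best msup
    else if t.1 > r then (best, msup)
    else if t.2 > msup then scanA p r rest (i + 1) i t.2
    else scanA p r rest (i + 1) best msup

-- the 'while current_pos < d' loop of A. The fuel argument is only a structural bound for the
-- recursion: it starts at stations.length + 1 and every round slices off at least one station,
-- so the fuel-0 branch is never reached.
def loopA (d : Int) : Nat → List (Int × Int) → Int → Int → Int → Int
  | 0, _, _, _, _ => -1   -- unreachable
  | fuel + 1, stations, water, pos, count =>
    if pos < d then
      let maxReach := pos + water
      if maxReach ≥ d then count
      else
        let bm := scanA pos maxReach stations 0 (-1) (-1)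
        if bm.1 = -1 then -1
        else
          match PySem.List.pyGet? stations bm.1 with
          | none => -1   -- unreachable: Python's stations[best] is always in range
          | some st =>
            -- 'current_water -= (station_pos - current_pos)' is immediately overwritten in A:
            let _dead := water - (st.1 - pos)
            loopA d fuel (PySem.List.slice stations (some (bm.1 + 1)) none) st.2 st.1 (count + 1)
    else count

def solution (d : Int) (w : Int) (position : List Int) (supply : List Int) : Int :=
  if w ≥ d then 0
  else if position = [] then -1
  else
    let stations := PySem.List.sorted2 (position.zip supply) (fun t => t.1) (fun t => t.2)
    loopA d (stations.length + 1) stations w 0 0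

-- ===== PORT B =====

-- 'for i, (q, s) in enumerate(by_supply): if pos < q <= pos + water: chosen = i; break'
def findWin (p r : Int) : List (Int × Int) → Nat → Option Nat
  | [], _ => none
  | t :: rest, i => if p < t.1 ∧ t.1 ≤ r then some i else findWin p r rest (i + 1)

-- B's 'while pos < d' loop: first station of the supply-ordered list inside the window, then pop
-- it. Fuel is again only the structural bound lst.length + 1 (one pop per round); never exhausted.
def loopB (d : Int) : Nat → List (Int × Int) → Int → Int → Int → Int
  | 0, _, _, _, _ => -1   -- unreachable
  | fuel + 1, lst, pos, water, refills =>
    if pos < d then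
      if pos + water ≥ d then refills
      else
        match findWin pos (pos + water) lst 0 with
        | none => -1
        | some i =>
          match PySem.List.pop? lst (i : Int) with
          | none => -1   -- unreachable: Python's by_supply.pop(chosen) is always in range
          | some er => loopB d fuel er.2 er.1.1 er.1.2 (refills + 1)
    else refills

def solution_alt (d : Int) (w : Int) (position : List Int) (supply : List Int) : Int :=
  if w ≥ d then 0
  else if position = [] then -1
  else
    let bySupply := PySem.List.sorted2 (position.zip supply) (fun t => -t.2) (fun t => t.1)
    loopB d (bySupply.length + 1) bySupply 0 w 0

-- ===== PRECONDITION & SPEC =====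
def Spec_solution (d : Int) (w : Int) (position : List Int) (supply : List Int) (out : Int) : Prop := out = solution_alt d w position supply
instance (d : Int) (w : Int) (position : List Int) (supply : List Int) (out : Int) : Decidable (Spec_solution d w position supply out) := by unfold Spec_solution; infer_instance

-- ===== CLAIM (what is proved, stated in full; the proofs are below) =====
def Claim_equal_solution : Prop := ∀ (d : Int) (w : Int) (position : List Int) (supply : List Int), Dom_solution d w position supply → Spec_solution d w position supply (solution d w position supply)

-- ===== LEMMAS AND PROOFS =====

-- window membership test (as the Bool that List.filter takes)
def winB (p r : Int) (t : Int × Int) : Bool := decide (p < t.1 ∧ t.1 ≤ r)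

-- "past the current position" test; the loop invariant is phrased with it
def gtB (p : Int) (t : Int × Int) : Bool := decide (p < t.1)

-- e is the station A's greedy step selects from l: in the window, of maximal supply,
-- nearest on supply ties
def BestWin (p r : Int) (l : List (Int × Int)) (e : Int × Int) : Prop :=
  e ∈ l ∧ p < e.1 ∧ e.1 ≤ r ∧
    ∀ f ∈ l, p < f.1 → f.1 ≤ r → (f.2 < e.2 ∨ (f.2 = e.2 ∧ e.1 ≤ f.1))

theorem pv_pairwise_insertBy {α : Type} (before : α → α → Bool)
    (h1 : ∀ a b, before a b = true → before b a = false)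
    (h2 : ∀ x y z, before x y = true → before z y = false → before z x = false)
    (x : α) : ∀ (ys : List α), ys.Pairwise (fun a b => before b a = false) →
    (PySem.List.insertBy before x ys).Pairwise (fun a b => before b a = false) := by
  intro ys
  induction ys with
  | nil => intro _; simp [PySem.List.insertBy]
  | cons y ys ih =>
    intro hys
    rw [List.pairwise_cons] at hys
    obtain ⟨hy, hys'⟩ := hys
    by_cases hxy : before x y = true
    · rw [show PySem.List.insertBy before x (y :: ys) = x :: y :: ys from by
        simp [PySem.List.insertBy, hxy]]
      refine List.pairwise_cons.mpr ⟨?_, List.pairwise_cons.mpr ⟨hy, hys'⟩⟩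
      intro z hz
      rcases List.mem_cons.mp hz with rfl | hz'
      · exact h1 x z hxy
      · exact h2 x y z hxy (hy z hz')
    · have hxyf : before x y = false := by
        cases hxb : before x y
        · rfl
        · exact absurd hxb hxy
      rw [show PySem.List.insertBy before x (y :: ys) = y :: PySem.List.insertBy before x ys from by
        simp [PySem.List.insertBy, hxy]]
      refine List.pairwise_cons.mpr ⟨?_, ih hys'⟩
      intro z hz
      rcases (PySem.List.mem_insertBy before x z ys).mp hz with rfl | hz'
      · exact hxyf
      · exact hy z hz' 

theorem pv_sorted2_pairwise (xs : List (Int × Int)) (k1 k2 : (Int × Int) → Int) :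
    (PySem.List.sorted2 xs k1 k2).Pairwise
      (fun a b => k1 a < k1 b ∨ (k1 a = k1 b ∧ k2 a ≤ k2 b)) := by
  set before : (Int × Int) → (Int × Int) → Bool :=
    fun a b => decide (k1 a < k1 b) || (!decide (k1 b < k1 a) && decide (k2 a < k2 b)) with hbef
  have hchar : ∀ a b, before a b = true ↔ (k1 a < k1 b ∨ (¬(k1 b < k1 a) ∧ k2 a < k2 b)) := by
    intro a b; simp [hbef]
  have hcharf : ∀ a b, before a b = false ↔ ¬(k1 a < k1 b ∨ (¬(k1 b < k1 a) ∧ k2 a < k2 b)) := by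
    intro a b
    rw [← hchar]
    cases before a b <;> simp
  have h1 : ∀ a b, before a b = true → before b a = false := by
    intro a b hab
    rw [hchar] at hab
    rw [hcharf]
    omega
  have h2 : ∀ x y z, before x y = true → before z y = false → before z x = false := by
    intro x y z hxy hzy
    rw [hchar] at hxy
    rw [hcharf] at hzy ⊢
    omega
  have hfold : ∀ (ys : List (Int × Int)) (acc : List (Int × Int)),
      acc.Pairwise (fun a b => before b a = false) →
      (ys.foldl (fun acc x => PySem.List.insertBy before x acc) acc).Pairwise
        (fun a b => before b a = false) := by
    intro ys
    induction ys with
    | nil => intro acc hacc; exact hacc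
    | cons y ys ih =>
      intro acc hacc
      exact ih _ (pv_pairwise_insertBy before h1 h2 y acc hacc)
  have hdef : PySem.List.sorted2 xs k1 k2 =
      xs.foldl (fun acc x => PySem.List.insertBy before x acc) [] := rfl
  rw [hdef]
  refine (hfold xs [] (by simp)).imp ?_
  intro a b hab
  rw [hcharf] at hab
  omega

theorem scanA_char (p r : Int) : ∀ (l : List (Int × Int)),
    l.Pairwise (fun a b => a.1 ≤ b.1) → ∀ (i b m : Int),
    (scanA p r l i b m = (b, m) ∧ ∀ t ∈ l, p < t.1 → t.1 ≤ r → t.2 ≤ m)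
    ∨ (∃ (k : Nat) (hk : k < l.length),
        p < l[k].1 ∧ l[k].1 ≤ r ∧ m < l[k].2 ∧
        scanA p r l i b m = (i + (k : Int), l[k].2) ∧
        ∀ (j : Nat) (hj : j < l.length), p < l[j].1 → l[j].1 ≤ r →
          (l[j].2 < l[k].2 ∨ (l[j].2 = l[k].2 ∧ k ≤ j))) := by
  intro l
  induction l with
  | nil =>
    intro _ i b m
    left
    exact ⟨rfl, by simp⟩
  | cons t rest ih =>
    intro hpw i b m
    rw [List.pairwise_cons] at hpw
    obtain ⟨hhead, hrest⟩ := hpw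
    simp only [scanA]
    by_cases h1 : t.1 ≤ p
    · rw [if_pos h1]
      rcases ih hrest (i + 1) b m with ⟨heq, hall⟩ | ⟨k, hk, hw1, hw2, hm, heq, hfa⟩
      · left
        refine ⟨heq, ?_⟩
        intro u hu hu1 hu2
        rcases List.mem_cons.mp hu with rfl | hu'
        · omega
        · exact hall u hu' hu1 hu2
      · right
        refine ⟨k + 1, by simpa using hk, by simpa using hw1, by simpa using hw2,
          by simpa using hm, ?_, ?_⟩
        · rw [heq, Prod.mk.injEq]
          exact ⟨by push_cast; ring, by simp⟩
        · intro j hj hj1 hj2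
          cases j with
          | zero => simp at hj1; omega
          | succ j' =>
            have := hfa j' (by simpa using hj) (by simpa using hj1) (by simpa using hj2)
            simpa using this
    · rw [if_neg h1]
      by_cases h2 : t.1 > r
      · rw [if_pos h2]
        left
        refine ⟨rfl, ?_⟩
        intro u hu hu1 hu2
        rcases List.mem_cons.mp hu with rfl | hu'
        · omega
        · have := hhead u hu'
          omega
      · rw [if_neg h2]
        by_cases h3 : t.2 > m
        · rw [if_pos h3]
          rcases ih hrest (i + 1) i t.2 with ⟨heq, hall⟩ | ⟨k, hk, hw1, hw2, hm, heq, hfa⟩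
          · right
            refine ⟨0, by simp, by simpa using (by omega : p < t.1), by simpa using (by omega : t.1 ≤ r),
              by simpa using h3, ?_, ?_⟩
            · rw [heq, Prod.mk.injEq]
              exact ⟨by push_cast; ring, by simp⟩
            · intro j hj hj1 hj2
              cases j with
              | zero => exact Or.inr ⟨by simp, Nat.zero_le _⟩
              | succ j' =>
                have hj' : j' < rest.length := by simpa using hj
                have := hall (rest[j']'hj') (List.getElem_mem hj') (by simpa using hj1)
                  (by simpa using hj2)
                simp only [List.getElem_cons_succ, List.getElem_cons_zero]
                omega
          · right
            refine ⟨k + 1, by simpa using hk, by simpa using hw1, by simpa using hw2,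
              by simpa using (by omega : m < rest[k].2), ?_, ?_⟩
            · rw [heq, Prod.mk.injEq]
              exact ⟨by push_cast; ring, by simp⟩
            · intro j hj hj1 hj2
              cases j with
              | zero =>
                simp only [List.getElem_cons_zero, List.getElem_cons_succ]
                omega
              | succ j' =>
                have := hfa j' (by simpa using hj) (by simpa using hj1) (by simpa using hj2)
                simp only [List.getElem_cons_succ]
                omega
        · rw [if_neg h3]
          rcases ih hrest (i + 1) b m with ⟨heq, hall⟩ | ⟨k, hk, hw1, hw2, hm, heq, hfa⟩
          · left
            refine ⟨heq, ?_⟩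
            intro u hu hu1 hu2
            rcases List.mem_cons.mp hu with rfl | hu'
            · omega
            · exact hall u hu' hu1 hu2
          · right
            refine ⟨k + 1, by simpa using hk, by simpa using hw1, by simpa using hw2,
              by simpa using hm, ?_, ?_⟩
            · rw [heq, Prod.mk.injEq]
              exact ⟨by push_cast; ring, by simp⟩
            · intro j hj hj1 hj2
              cases j with
              | zero =>
                simp only [List.getElem_cons_zero, List.getElem_cons_succ]
                omega
              | succ j' =>
                have := hfa j' (by simpa using hj) (by simpa using hj1) (by simpa using hj2)
                simp only [List.getElem_cons_succ]
                omega

theorem findWin_eq_none (p r : Int) : ∀ (l : List (Int × Int)) (i : Nat),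
    findWin p r l i = none ↔ ∀ t ∈ l, ¬(p < t.1 ∧ t.1 ≤ r) := by
  intro l
  induction l with
  | nil => intro i; simp [findWin]
  | cons t rest ih =>
    intro i
    simp only [findWin]
    by_cases h : p < t.1 ∧ t.1 ≤ r
    · simp [h]
    · rw [if_neg h, ih (i + 1)]
      constructor
      · intro ha u hu
        rcases List.mem_cons.mp hu with rfl | hu'
        · exact h
        · exact ha u hu'
      · intro ha u hu
        exact ha u (List.mem_cons_of_mem _ hu)

theorem findWin_eq_some (p r : Int) : ∀ (l : List (Int × Int)) (i j : Nat),
    findWin p r l i = some j → ∃ (k : Nat) (hk : k < l.length), j = i + k ∧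
      (p < l[k].1 ∧ l[k].1 ≤ r) ∧
      ∀ (j' : Nat) (hj' : j' < l.length), j' < k → ¬(p < l[j'].1 ∧ l[j'].1 ≤ r) := by
  intro l
  induction l with
  | nil => intro i j h; simp [findWin] at h
  | cons t rest ih =>
    intro i j h
    simp only [findWin] at h
    by_cases hw : p < t.1 ∧ t.1 ≤ r
    · simp only [if_pos hw, Option.some.injEq] at h
      exact ⟨0, by simp, by omega, by simpa using hw, by intro j' _ hj'; omega⟩
    · rw [if_neg hw] at h
      obtain ⟨k, hk, hjk, hwk, hfirst⟩ := ih (i + 1) j h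
      refine ⟨k + 1, by simpa using hk, by omega, by simpa using hwk, ?_⟩
      intro j' hj' hlt
      cases j' with
      | zero => simpa using hw
      | succ j'' =>
        have := hfirst j'' (by simpa using hj') (by omega)
        simpa using this

-- A's scan picks the BestWin element (uses that the list is position-sorted)
theorem bestA (p r : Int) (l : List (Int × Int)) (hpw : l.Pairwise (fun a b => a.1 ≤ b.1))
    (k : Nat) (hk : k < l.length) (hw1 : p < l[k].1) (hw2 : l[k].1 ≤ r)
    (hfa : ∀ (j : Nat) (hj : j < l.length), p < l[j].1 → l[j].1 ≤ r →
      (l[j].2 < l[k].2 ∨ (l[j].2 = l[k].2 ∧ k ≤ j))) :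
    BestWin p r l l[k] := by
  refine ⟨List.getElem_mem hk, hw1, hw2, ?_⟩
  intro f hf hf1 hf2
  obtain ⟨j, hj, rfl⟩ := List.mem_iff_getElem.mp hf
  rcases hfa j hj hf1 hf2 with h | ⟨he, hkj⟩
  · exact Or.inl h
  · refine Or.inr ⟨he, ?_⟩
    rcases Nat.eq_or_lt_of_le hkj with heq | hlt
    · subst heq; exact le_refl _
    · exact List.pairwise_iff_getElem.mp hpw k j hk hj hlt

-- B's first window hit in supply order is the BestWin element
theorem bestB (p r : Int) (l : List (Int × Int))
    (hpw : l.Pairwise (fun a b => b.2 < a.2 ∨ (a.2 = b.2 ∧ a.1 ≤ b.1)))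
    (k : Nat) (hk : k < l.length) (hw : p < l[k].1 ∧ l[k].1 ≤ r)
    (hfirst : ∀ (j' : Nat) (hj' : j' < l.length), j' < k → ¬(p < l[j'].1 ∧ l[j'].1 ≤ r)) :
    BestWin p r l l[k] := by
  refine ⟨List.getElem_mem hk, hw.1, hw.2, ?_⟩
  intro f hf hf1 hf2
  obtain ⟨j, hj, rfl⟩ := List.mem_iff_getElem.mp hf
  rcases Nat.lt_trichotomy j k with hlt | heq | hgt
  · exact absurd ⟨hf1, hf2⟩ (hfirst j hj hlt)
  · subst heq; exact Or.inr ⟨rfl, le_refl _⟩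
  · rcases List.pairwise_iff_getElem.mp hpw k j hk hj hgt with h | ⟨he, hle⟩
    · exact Or.inl h
    · exact Or.inr ⟨he.symm, hle⟩

theorem mem_winB {p r : Int} {l : List (Int × Int)} {e : Int × Int} :
    e ∈ l.filter (winB p r) ↔ e ∈ l ∧ p < e.1 ∧ e.1 ≤ r := by
  simp [winB, List.mem_filter]

theorem winB_perm {p r : Int} {lA lB : List (Int × Int)}
    (h : (lA.filter (gtB p)).Perm (lB.filter (gtB p))) :
    (lA.filter (winB p r)).Perm (lB.filter (winB p r)) := by
  have e1 : ∀ (l : List (Int × Int)), l.filter (winB p r) =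
      (l.filter (gtB p)).filter (fun t => decide (t.1 ≤ r)) := by
    intro l
    rw [List.filter_filter]
    apply List.filter_congr
    intro t _
    by_cases h1 : p < t.1 <;> by_cases h2 : t.1 ≤ r <;> simp [winB, gtB, h1, h2]
  rw [e1, e1]
  exact h.filter _

theorem bestWin_unique {p r : Int} {lA lB : List (Int × Int)} {eA eB : Int × Int}
    (hperm : (lA.filter (winB p r)).Perm (lB.filter (winB p r)))
    (hA : BestWin p r lA eA) (hB : BestWin p r lB eB) : eA = eB := by
  obtain ⟨hmA, hA1, hA2, hbA⟩ := hA
  obtain ⟨hmB, hB1, hB2, hbB⟩ := hB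
  have hAB : eA ∈ lB ∧ p < eA.1 ∧ eA.1 ≤ r :=
    mem_winB.mp (hperm.mem_iff.mp (mem_winB.mpr ⟨hmA, hA1, hA2⟩))
  have hBA : eB ∈ lA ∧ p < eB.1 ∧ eB.1 ≤ r :=
    mem_winB.mp (hperm.mem_iff.mpr (mem_winB.mpr ⟨hmB, hB1, hB2⟩))
  have h1 := hbA eB hBA.1 hBA.2.1 hBA.2.2
  have h2 := hbB eA hAB.1 hAB.2.1 hAB.2.2
  have : eA.1 = eB.1 ∧ eA.2 = eB.2 := by omega
  exact Prod.ext this.1 this.2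

-- dropping the prefix up to the chosen station keeps every station past its position
theorem filter_drop_gt (l : List (Int × Int)) (hpw : l.Pairwise (fun a b => a.1 ≤ b.1))
    (k : Nat) (hk : k < l.length) (x : Int) (hxk : l[k].1 ≤ x) :
    (List.drop (k + 1) l).filter (gtB x) = l.filter (gtB x) := by
  conv_rhs => rw [← List.take_append_drop (k + 1) l]
  rw [List.filter_append]
  have : (List.take (k + 1) l).filter (gtB x) = [] := by
    rw [List.filter_eq_nil_iff]
    intro u hu
    obtain ⟨j, hj, hju⟩ := List.mem_iff_getElem.mp hu
    have hjl : j < l.length := lt_of_lt_of_le hj (by simp)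
    have hgu : (List.take (k + 1) l)[j] = l[j] := List.getElem_take
    have hle : l[j].1 ≤ x := by
      refine le_trans ?_ hxk
      rcases Nat.lt_or_ge j k with hlt | hge
      · exact List.pairwise_iff_getElem.mp hpw j k hjl hk hlt
      · have hjk : j = k := by simp [List.length_take] at hj; omega
        subst hjk; exact le_refl _
    rw [← hju, hgu]
    simp [gtB]
    omega
  rw [this, List.nil_append]

-- removing the chosen station keeps every station past its position
theorem filter_eraseIdx_gt (l : List (Int × Int)) (k : Nat) (hk : k < l.length)
    (x : Int) (hxk : ¬ x < l[k].1) :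
    (l.eraseIdx k).filter (gtB x) = l.filter (gtB x) := by
  conv_rhs => rw [← List.take_append_drop k l, List.drop_eq_getElem_cons hk]
  rw [List.eraseIdx_eq_take_drop_succ, List.filter_append, List.filter_append, List.filter_cons]
  have hfalse : gtB x l[k] = false := by
    simp only [gtB, decide_eq_false_iff_not]
    exact hxk
  rw [hfalse]
  simp

-- moving the frontier forward: the new filter factors through the old one
theorem filter_gt_rebase (l : List (Int × Int)) (p q : Int) (hpq : p ≤ q) :
    l.filter (gtB q) = (l.filter (gtB p)).filter (gtB q) := by
  rw [List.filter_filter]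
  apply List.filter_congr
  intro t _
  simp [gtB]
  omega

theorem loop_eq (d : Int) : ∀ (n : Nat) (lA lB : List (Int × Int))
    (pos water count : Int) (fa fb : Nat),
    lA.length < fa → lB.length < fb →
    lA.Pairwise (fun a b => a.1 < b.1 ∨ (a.1 = b.1 ∧ a.2 ≤ b.2)) →
    lB.Pairwise (fun a b => b.2 < a.2 ∨ (a.2 = b.2 ∧ a.1 ≤ b.1)) →
    (lA.filter (gtB pos)).Perm (lB.filter (gtB pos)) →
    lB.length ≤ n →
    loopA d fa lA water pos count = loopB d fb lB pos water count := by
  intro n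
  induction n using Nat.strong_induction_on with
  | _ n ih =>
  intro lA lB pos water count fa fb hfa hfb hpwA hpwB hperm hn
  have hA' : lA.Pairwise (fun a b => a.1 ≤ b.1) := hpwA.imp (fun h => by omega)
  cases fa with
  | zero => omega
  | succ fa =>
  cases fb with
  | zero => omega
  | succ fb =>
  simp only [loopA, loopB]
  by_cases hpd : pos < d
  · rw [if_pos hpd, if_pos hpd]
    by_cases hreach : pos + water ≥ d
    · simp [hreach]
    · simp only [if_neg hreach]
      rcases scanA_char pos (pos + water) lA hA' 0 (-1) (-1) with
        ⟨heqA, hallA⟩ | ⟨k, hk, hw1, hw2, hm, heqA, hfaA⟩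
      · -- A finds no station it would refill at: A returns -1, and so does B
        rw [heqA]
        cases hFW : findWin pos (pos + water) lB 0 with
        | none => rfl
        | some j =>
          obtain ⟨k', hk', hj0, hwB, hfirst⟩ := findWin_eq_some pos (pos + water) lB 0 j hFW
          subst hj0
          simp only [Nat.zero_add]
          rw [PySem.List.pop?_natCast lB k' hk']
          -- B hops to a station of supply ≤ -1 and then fails as well
          have hsup : lB[k'].2 ≤ -1 := by
            have hmem : lB[k'] ∈ lA.filter (winB pos (pos + water)) :=
              (winB_perm hperm).mem_iff.mpr
                (mem_winB.mpr ⟨List.getElem_mem hk', hwB.1, hwB.2⟩)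
            have := mem_winB.mp hmem
            exact hallA lB[k'] this.1 this.2.1 this.2.2
          cases fb with
          | zero => omega
          | succ fb2 =>
            simp only [loopB]
            have h1 : lB[k'].1 < d := by omega
            rw [if_pos h1]
            have h2 : ¬ lB[k'].1 + lB[k'].2 ≥ d := by omega
            rw [if_neg h2]
            have h3 : findWin lB[k'].1 (lB[k'].1 + lB[k'].2) (lB.eraseIdx k') 0 = none := by
              rw [findWin_eq_none]
              intro t _
              omega
            rw [h3]
            simp
      · -- A refills at lA[k]; B picks the same station
        rw [heqA]
        have hne : ¬ ((0 : Int) + (k : Int) = -1) := by omega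
        rw [if_neg hne]
        have hcast : (0 : Int) + (k : Int) = ((k : Nat) : Int) := by omega
        rw [hcast, PySem.List.pyGet?_natCast, List.getElem?_eq_getElem hk]
        have hcast2 : ((k : Nat) : Int) + 1 = (((k + 1 : Nat)) : Int) := by omega
        rw [hcast2, PySem.List.slice_from_natCast]
        cases hFW : findWin pos (pos + water) lB 0 with
        | none =>
          exfalso
          have hmem : lA[k] ∈ lB.filter (winB pos (pos + water)) :=
            (winB_perm hperm).mem_iff.mp
              (mem_winB.mpr ⟨List.getElem_mem hk, hw1, hw2⟩)
          have := mem_winB.mp hmem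
          exact (findWin_eq_none pos (pos + water) lB 0).mp hFW lA[k] this.1 ⟨this.2.1, this.2.2⟩
        | some j =>
          obtain ⟨k', hk', hj0, hwB, hfirst⟩ := findWin_eq_some pos (pos + water) lB 0 j hFW
          subst hj0
          simp only [Nat.zero_add]
          rw [PySem.List.pop?_natCast lB k' hk']
          have hBestA : BestWin pos (pos + water) lA lA[k] := bestA pos (pos + water) lA hA' k hk hw1 hw2 hfaA
          have hBestB : BestWin pos (pos + water) lB lB[k'] := bestB pos (pos + water) lB hpwB k' hk' hwB hfirst
          have hEq : lA[k] = lB[k'] := bestWin_unique (winB_perm hperm) hBestA hBestB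
          rw [← hEq]
          show loopA d fa (List.drop (k + 1) lA) lA[k].2 lA[k].1 (count + 1) =
            loopB d fb (lB.eraseIdx k') lA[k].1 lA[k].2 (count + 1)
          have hlenB : (lB.eraseIdx k').length = lB.length - 1 := by
            rw [List.length_eraseIdx]; simp [hk']
          apply ih (lB.length - 1) (by omega)
          · simp only [List.length_drop]; omega
          · omega
          · exact List.Pairwise.sublist (List.drop_sublist (k + 1) lA) hpwA
          · exact List.Pairwise.sublist (List.eraseIdx_sublist lB k') hpwB
          · rw [filter_drop_gt lA hA' k hk lA[k].1 (le_refl _)]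
            rw [filter_eraseIdx_gt lB k' hk' lA[k].1 (by rw [hEq]; omega)]
            rw [filter_gt_rebase lA pos lA[k].1 (le_of_lt hw1),
              filter_gt_rebase lB pos lA[k].1 (le_of_lt hw1)]
            exact hperm.filter _
          · omega
  · rw [if_neg hpd, if_neg hpd]

-- ===== VERDICT (by name: the statement is the Claim_ definition above) =====
theorem solution_spec : Claim_equal_solution := by
  unfold Claim_equal_solution
  intro d w position supply _
  unfold Spec_solution solution solution_alt
  by_cases h1 : w ≥ d
  · rw [if_pos h1, if_pos h1]
  · rw [if_neg h1, if_neg h1]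
    by_cases h2 : position = []
    · rw [if_pos h2, if_pos h2]
    · rw [if_neg h2, if_neg h2]
      show loopA d
          ((PySem.List.sorted2 (position.zip supply) (fun t => t.1) (fun t => t.2)).length + 1)
          (PySem.List.sorted2 (position.zip supply) (fun t => t.1) (fun t => t.2)) w 0 0 =
        loopB d
          ((PySem.List.sorted2 (position.zip supply) (fun t => -t.2) (fun t => t.1)).length + 1)
          (PySem.List.sorted2 (position.zip supply) (fun t => -t.2) (fun t => t.1)) 0 w 0
      refine loop_eq d
        ((PySem.List.sorted2 (position.zip supply) (fun t => -t.2) (fun t => t.1)).length)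
        _ _ 0 w 0 _ _ (by omega) (by omega)
        (pv_sorted2_pairwise (position.zip supply) (fun t => t.1) (fun t => t.2))
        ((pv_sorted2_pairwise (position.zip supply) (fun t => -t.2) (fun t => t.1)).imp
          (fun h => by omega))
        ?_ (le_refl _)
      exact ((PySem.List.sorted2_perm (position.zip supply) (fun t => t.1) (fun t => t.2) false).trans
        (PySem.List.sorted2_perm (position.zip supply) (fun t => -t.2) (fun t => t.1) false).symm).filter _
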